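-- pv_equiv track=rewrite | github.com/AlfaBettaGamma/24.Keymaker | lesson_24.py | Keymaker
-- ===== SOURCE A (Python) =====
-- def Keymaker(k):
--   kst = []
--   step = 0
--   result = ''
--   for j in range(k):
--     if step == 0: # первый этап
--       for i in range(k):
--         kst.append(1)
--       step += 1
--     else: # второй и последующие этапы
--       for i in range(k):
--         if i%(j+1) == j:
--           if kst[i] == 0:
--             kst.insert(i,1)
--             kst.pop(i+1)
--           else:
--             kst.insert(i,0)
--             kst.pop(i+1)
--   for i in range(len(kst)):
--     result += str(kst[i])
--   return result
-- ===== SOURCE B (Python) =====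
-- def Keymaker(k):
--     # Divisor sieve: start all lockers at 1, toggle every d-th locker for d = 2..k.
--     if k <= 0:
--         return ''
--     arr = [1] * k
--     for d in range(2, k + 1):
--         for m in range(d - 1, k, d):
--             arr[m] = 1 - arr[m]
--     return ''.join(map(str, arr))
-- ===== Notes on version B (the rewrite author's own statement) =====
-- stated objective: faster
-- what changed: A simulates every stage over all k lockers and toggles via insert+pop list surgery; B allocates the lockers once and runs a divisor sieve that visits only the multiples of each d (2..k), toggling in place, then joins the digits.
import Mathlib
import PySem

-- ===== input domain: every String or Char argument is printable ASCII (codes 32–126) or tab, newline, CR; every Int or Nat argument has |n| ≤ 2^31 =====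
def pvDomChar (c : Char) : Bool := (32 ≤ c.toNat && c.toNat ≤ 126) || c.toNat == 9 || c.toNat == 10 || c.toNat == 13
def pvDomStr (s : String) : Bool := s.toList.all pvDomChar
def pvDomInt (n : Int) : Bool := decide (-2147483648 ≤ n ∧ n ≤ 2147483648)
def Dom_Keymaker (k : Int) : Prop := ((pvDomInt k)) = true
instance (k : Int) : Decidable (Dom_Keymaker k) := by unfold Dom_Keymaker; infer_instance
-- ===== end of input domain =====

-- B replaces A's quadratic simulation (toggle every locker i with i%(j+1)==j via insert/pop passes)
-- by a divisor sieve that visits only the multiples of each d — same string, asymptotically faster.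


-- ===== PORT A =====
-- one iteration of A's inner 'for i in range(k)' body (second and later stages):
-- Option threads a possible IndexError of kst[i] / kst.pop(i+1) (never hit: i < len(kst))
def kmStepA (j : Int) (acc : Option (List Int)) (i : Int) : Option (List Int) :=
  match acc with
  | none => none
  | some kst =>
    if PySem.Int.mod i (j + 1) = j then
      match PySem.List.pyGet? kst i with
      | none => none
      | some v =>
        if v = 0 then (PySem.List.pop? (PySem.List.insert kst i 1) (i + 1)).map Prod.snd
        else (PySem.List.pop? (PySem.List.insert kst i 0) (i + 1)).map Prod.snd
    else some kst

-- one iteration of A's outer 'for j in range(k)' body, state = (kst, step)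
def kmOuterA (k : Int) (st : Option (List Int × Int)) (j : Int) : Option (List Int × Int) :=
  match st with
  | none => none
  | some (kst, step) =>
    if step = 0 then
      some ((PySem.List.pyRange 0 k 1).foldl (fun l _ => l ++ [(1 : Int)]) kst, step + 1)
    else
      ((PySem.List.pyRange 0 k 1).foldl (kmStepA j) (some kst)).map (fun l => (l, step))

def Keymaker (k : Int) : String :=
  match (PySem.List.pyRange 0 k 1).foldl (kmOuterA k) (some ([], 0)) with
  | none => ""   -- unreachable: every index the loops touch is in range
  | some (kst, _) =>
      -- result += str(kst[i]) for i in range(len(kst)); i is in range, so pyGetD is exact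
      String.ofList ((PySem.List.pyRange 0 (PySem.List.len kst) 1).foldl
        (fun r i => r ++ PySem.Int.toChars (PySem.List.pyGetD kst i 0)) [])

-- ===== PORT B =====
def Keymaker_alt (k : Int) : String :=
  if k ≤ 0 then "" else
    let arr0 := PySem.List.pyRepeat [(1 : Int)] k           -- [1] * k
    let arr := (PySem.List.pyRange 2 (k + 1) 1).foldl (fun a d =>
        (PySem.List.pyRange (d - 1) k d).foldl
          (fun a m => PySem.List.pySetD a m (1 - PySem.List.pyGetD a m 0)) a) arr0
    PySem.Str.join "" (arr.map PySem.Int.toStr)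

-- ===== PRECONDITION & SPEC =====
def Spec_Keymaker (k : Int) (out : String) : Prop := out = Keymaker_alt k
instance (k : Int) (out : String) : Decidable (Spec_Keymaker k out) := by unfold Spec_Keymaker; infer_instance

-- ===== CLAIM (what is proved, stated in full; the proofs are below) =====
def Claim_equal_Keymaker : Prop := ∀ (k : Int), Dom_Keymaker k → Spec_Keymaker k (Keymaker k)

-- ===== LEMMAS AND PROOFS =====

-- toggle position p (a nonnegative Int index) of l through g
def kmTog (g : Int → Int) (l : List Int) (p : Int) : List Int :=
  l.set p.toNat (g (l.getD p.toNat 0))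

theorem kmTog_length (g : Int → Int) (l : List Int) (p : Int) :
    (kmTog g l p).length = l.length := by
  simp [kmTog]

-- kst.insert(i,x); kst.pop(i+1)  ==  kst[i] = x
theorem km_insert_pop (l : List Int) (n : Nat) (h : n < l.length) (x : Int) :
    (PySem.List.pop? (PySem.List.insert l (n : Int) x) ((n : Int) + 1)).map Prod.snd
      = some (l.set n x) := by
  rw [PySem.List.insert_natCast l n x (le_of_lt h)]
  have hcast : ((n : Int) + 1) = ((n + 1 : Nat) : Int) := by push_cast; ring
  rw [hcast, PySem.List.pop?_natCast _ (n + 1) (by simp [h])]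
  simp only [Option.map_some]
  congr 1
  rw [List.eraseIdx_append_of_length_le (by simp [List.length_take, Nat.le_of_lt h])]
  rw [List.set_eq_take_cons_drop x h]
  rw [List.drop_eq_getElem_cons h]
  simp [List.length_take, Nat.min_eq_left (le_of_lt h)]

-- A's conditional step, on an in-range index, is a conditional kmTog
theorem kmStepA_eq (j : Int) (l : List Int) (i : Int) (h0 : 0 ≤ i) (hi : i < (l.length : Int)) :
    kmStepA j (some l) i
      = some (if PySem.Int.mod i (j + 1) = j
              then kmTog (fun v => if v = 0 then 1 else 0) l i else l) := by
  obtain ⟨n, rfl⟩ : ∃ n : Nat, i = (n : Int) := ⟨i.toNat, by omega⟩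
  have hlt : n < l.length := by omega
  by_cases hc : PySem.Int.mod (n : Int) (j + 1) = j
  · simp only [hc, if_pos, kmStepA, PySem.List.pyGet?_natCast,
      List.getElem?_eq_getElem hlt]
    have hrhs : kmTog (fun v => if v = 0 then 1 else 0) l (n : Int)
        = l.set n (if l[n] = 0 then 1 else 0) := by
      unfold kmTog
      rw [Int.toNat_natCast, List.getD_eq_getElem l 0 hlt]
    rw [hrhs]
    by_cases hv : l[n] = 0
    · simp only [hv, ite_true]
      exact km_insert_pop l n hlt 1
    · simp only [hv, ite_false]
      exact km_insert_pop l n hlt 0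
  · simp [kmStepA, hc]

-- fold of A's steps over in-range indices never raises and is a plain fold of toggles
theorem km_foldA (j : Int) (ps : List Int) (l : List Int)
    (hin : ∀ p ∈ ps, 0 ≤ p ∧ p < (l.length : Int)) :
    ps.foldl (kmStepA j) (some l)
      = some (ps.foldl (fun l i => if PySem.Int.mod i (j + 1) = j
                                   then kmTog (fun v => if v = 0 then 1 else 0) l i else l) l) := by
  induction ps generalizing l with
  | nil => rfl
  | cons p t ih =>
    have hp := hin p (List.mem_cons_self ..)
    simp only [List.foldl_cons]
    rw [kmStepA_eq j l p hp.1 hp.2]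
    rw [ih _ (fun q hq => ?_)]
    
    have := (hin q (List.mem_cons_of_mem _ hq))
    split
    · simpa [kmTog_length] using this
    · exact this

-- folding toggles over distinct in-range positions = one pointwise map
theorem km_foldTog (g : Int → Int) (ps : List Int) (l : List Int)
    (hnd : ps.Nodup) (hin : ∀ p ∈ ps, 0 ≤ p ∧ p < (l.length : Int)) :
    ps.foldl (kmTog g) l = l.mapIdx (fun n v => if (n : Int) ∈ ps then g v else v) := by
  induction ps generalizing l with
  | nil =>
    refine (List.ext_getElem (by simp) fun n h1 h2 => ?_)
    rw [List.getElem_mapIdx]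
    simp
  | cons p t ih =>
    have hp := hin p (List.mem_cons_self ..)
    have hplt : p.toNat < l.length := by omega
    simp only [List.foldl_cons]
    rw [ih (kmTog g l p) (List.nodup_cons.mp hnd).2
        (fun q hq => by simpa [kmTog_length] using hin q (List.mem_cons_of_mem _ hq))]
    apply List.ext_getElem (by simp [kmTog_length])
    intro n hn1 hn2
    have hnl : n < l.length := by simpa [kmTog_length] using hn1
    rw [List.getElem_mapIdx, List.getElem_mapIdx]
    by_cases hnp : (n : Int) = p
    · have hnt : (n : Int) ∉ t := hnp ▸ (List.nodup_cons.mp hnd).1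
      rw [if_neg hnt, if_pos (show (n : Int) ∈ p :: t by simp [hnp])]
      have hnn : n = p.toNat := by omega
      subst hnn
      simp [kmTog, List.getElem?_eq_getElem hplt]
    · have hne : p.toNat ≠ n := by omega
      have hval : (kmTog g l p)[n]'(by simpa [kmTog_length] using hnl) = l[n] := by
        simp [kmTog, List.getElem_set_ne hne]
      by_cases hm : (n : Int) ∈ t
      · rw [if_pos hm, if_pos (List.mem_cons_of_mem _ hm), hval]
      · rw [if_neg hm, if_neg (by simp [hnp, hm]), hval]

-- values stay 0/1
def kmBin (l : List Int) : Prop := ∀ v ∈ l, v = 0 ∨ v = 1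

-- one sieve pass of B is a pointwise map
theorem km_passB (k d : Int) (hd : 0 < d) (l : List Int)
    (hmem : ∀ p ∈ PySem.List.pyRange (d - 1) k d, 0 ≤ p ∧ p < (l.length : Int)) :
    (PySem.List.pyRange (d - 1) k d).foldl
        (fun a m => PySem.List.pySetD a m (1 - PySem.List.pyGetD a m 0)) l
      = l.mapIdx (fun n v => if (n : Int) ∈ PySem.List.pyRange (d - 1) k d then 1 - v else v) := by
  have hcong : ∀ (a : List Int) (m : Int), m ∈ PySem.List.pyRange (d - 1) k d →
      PySem.List.pySetD a m (1 - PySem.List.pyGetD a m 0) = kmTog (fun v => 1 - v) a m := by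
    intro a m hm
    have h0 := (hmem m hm).1
    rw [PySem.List.pySetD_of_nonneg a _ h0, PySem.List.pyGetD_of_nonneg a 0 h0]
    rfl
  rw [PySem.List.foldl_congr_mem _ _ (kmTog (fun v => 1 - v)) l hcong]
  refine km_foldTog _ _ l ?_ hmem
  rw [PySem.List.pyRange_of_pos _ _ hd]
  refine (List.nodup_range).map (fun a b h => ?_)
  have h2 : (d : Int) * a = d * b := by linarith
  exact_mod_cast mul_left_cancel₀ (by omega : (d : Int) ≠ 0) h2

-- membership in A's filtered index set = membership in B's arithmetic progression (Nat index n < k)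
theorem km_mem_iff (k j : Int) (hj : 1 ≤ j) (n : Nat) (hn : (n : Int) < k) :
    ((n : Int) ∈ (PySem.List.pyRange 0 k 1).filter
        (fun i => decide (PySem.Int.mod i (j + 1) = j)))
      ↔ ((n : Int) ∈ PySem.List.pyRange (j + 1 - 1) k (j + 1)) := by
  have hpos : (0 : Int) < j + 1 := by omega
  rw [List.mem_filter, PySem.List.mem_pyRange_one,
    PySem.List.mem_pyRange_iff_of_pos hpos]
  rw [PySem.Int.mod_eq_emod_of_pos hpos]
  simp only [decide_eq_true_eq]
  constructor
  · rintro ⟨⟨h0, hk⟩, hmod⟩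
    have hdq := Int.emod_add_mul_ediv (n : Int) (j + 1)
    have hq : 0 ≤ (n : Int) / (j + 1) := Int.ediv_nonneg h0 (by omega)
    refine ⟨by nlinarith [hmod ▸ hdq], hn, ⟨(n : Int) / (j + 1), by omega⟩⟩
  · rintro ⟨hge, -, c, hc⟩
    have hnn : (n : Int) = j + (j + 1) * c := by omega
    refine ⟨⟨by positivity, hn⟩, ?_⟩
    rw [hnn, Int.add_mul_emod_self_left]
    exact Int.emod_eq_of_lt (by omega) (by omega)

-- one pass of A = one pass of B (on a 0/1 list of length k)
theorem km_pass (k j : Int) (hj : 1 ≤ j) (_hjk : j < k) (l : List Int)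
    (hlen : (l.length : Int) = k) (hb : kmBin l) :
    (PySem.List.pyRange 0 k 1).foldl (kmStepA j) (some l)
      = some ((PySem.List.pyRange (j + 1 - 1) k (j + 1)).foldl
          (fun a m => PySem.List.pySetD a m (1 - PySem.List.pyGetD a m 0)) l) := by
  have hpos : (0 : Int) < j + 1 := by omega
  -- A side
  rw [km_foldA j _ l (fun p hp => by
    rw [PySem.List.mem_pyRange_one] at hp; exact ⟨hp.1, by omega⟩)]
  rw [PySem.List.foldl_ite_eq_foldl_filter
    (p := fun i => PySem.Int.mod i (j + 1) = j)
    (f := kmTog (fun v => if v = 0 then 1 else 0))]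
  rw [km_foldTog _ _ l ((PySem.List.nodup_pyRange_one 0 k).filter _)
    (fun p hp => by
      have := (List.mem_filter.mp hp).1
      rw [PySem.List.mem_pyRange_one] at this
      exact ⟨this.1, by omega⟩)]
  -- B side
  rw [km_passB k (j + 1) hpos l (fun p hp => by
    rw [PySem.List.mem_pyRange_iff_of_pos hpos] at hp
    exact ⟨by omega, by omega⟩)]
  -- pointwise equality
  congr 1
  apply List.ext_getElem (by simp)
  intro n hn1 hn2
  rw [List.getElem_mapIdx, List.getElem_mapIdx]
  have hnl : n < l.length := by simpa using hn1
  have hnk : (n : Int) < k := by omega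
  by_cases hmA : (n : Int) ∈ (PySem.List.pyRange 0 k 1).filter
      (fun i => decide (PySem.Int.mod i (j + 1) = j))
  · rw [if_pos hmA, if_pos ((km_mem_iff k j hj n hnk).mp hmA)]
    rcases hb _ (List.getElem_mem hnl) with h | h <;> simp [h]
  · rw [if_neg hmA, if_neg (fun hmB => hmA ((km_mem_iff k j hj n hnk).mpr hmB))]

-- A = B from stage j on (j ≥ 1): A's remaining outer loop equals B's remaining sieve
theorem km_outer (k : Int) (j : Int) (hj : 1 ≤ j) (l : List Int)
    (hlen : (l.length : Int) = k) (hb : kmBin l) :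
    (PySem.List.pyRange j k 1).foldl (kmOuterA k) (some (l, 1))
      = some ((PySem.List.pyRange (j + 1) (k + 1) 1).foldl (fun a d =>
          (PySem.List.pyRange (d - 1) k d).foldl
            (fun a m => PySem.List.pySetD a m (1 - PySem.List.pyGetD a m 0)) a) l, 1) := by
  by_cases hjk : j < k
  case neg =>
    rw [PySem.List.pyRange_one_eq_nil (by omega), PySem.List.pyRange_one_eq_nil (by omega)]
    rfl
  case pos =>
    rw [PySem.List.pyRange_one_cons hjk,
      PySem.List.pyRange_one_cons (a := j + 1) (b := k + 1) (by omega)]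
    simp only [List.foldl_cons]
    have hA : kmOuterA k (some (l, 1)) j
        = some ((PySem.List.pyRange (j + 1 - 1) k (j + 1)).foldl
            (fun a m => PySem.List.pySetD a m (1 - PySem.List.pyGetD a m 0)) l, 1) := by
      simp only [kmOuterA, if_neg (one_ne_zero)]
      rw [km_pass k j hj hjk l hlen hb]
      rfl
    rw [hA]
    -- the new list is again 0/1 of length k
    have hpos : (0 : Int) < j + 1 := by omega
    have hstep := km_passB k (j + 1) hpos l (fun p hp => by
      rw [PySem.List.mem_pyRange_iff_of_pos hpos] at hp
      exact ⟨by omega, by omega⟩)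
    simp only [hstep]
    have hbin : kmBin (l.mapIdx (fun n v =>
        if (n : Int) ∈ PySem.List.pyRange (j + 1 - 1) k (j + 1) then 1 - v else v)) := by
      intro v hv
      obtain ⟨n, hn, rfl⟩ := List.mem_mapIdx.mp hv
      split <;> rcases hb _ (List.getElem_mem hn) with h | h <;> simp [h]
    exact km_outer k (j + 1) (by omega) _ (by simpa using hlen) hbin
termination_by (k - j).toNat

-- ''.join over single-digit strings is the flattened character list
-- ''.join inserts nothing: it is list flattening
theorem km_chars_join_nil (xs : List (List Char)) : PySem.Chars.join [] xs = xs.flatten := by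
  induction xs with
  | nil => exact PySem.Chars.join_nil []
  | cons a t ih =>
    cases t with
    | nil => simp [PySem.Chars.join_singleton]
    | cons b t2 =>
      rw [PySem.Chars.join_cons_cons]
      simp [ih]

theorem km_join (l : List Int) :
    PySem.Str.join "" (l.map PySem.Int.toStr) = String.ofList (l.flatMap PySem.Int.toChars) := by
  have h : (PySem.Str.join "" (l.map PySem.Int.toStr)).toList = l.flatMap PySem.Int.toChars := by
    rw [PySem.Str.toList_join, List.map_map]
    rw [show (String.toList ∘ PySem.Int.toStr) = PySem.Int.toChars from
      funext PySem.Int.toList_toStr]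
    rw [show "".toList = ([] : List Char) from rfl, km_chars_join_nil]
    simp [List.flatMap_def]
  conv_lhs => rw [← String.ofList_toList (s := PySem.Str.join "" (l.map PySem.Int.toStr))]
  rw [h]

-- the final printing loop of A
theorem km_print (kst : List Int) :
    String.ofList ((PySem.List.pyRange 0 (PySem.List.len kst) 1).foldl
        (fun r i => r ++ PySem.Int.toChars (PySem.List.pyGetD kst i 0)) [])
      = String.ofList (kst.flatMap PySem.Int.toChars) := by
  rw [PySem.List.len_eq, PySem.List.foldl_pyRange_zero_pyGetD' kst 0
    (fun r v => r ++ PySem.Int.toChars v) []]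
  rw [PySem.List.foldl_append_eq_flatMap]
  simp

-- ===== VERDICT (by name: the statement is the Claim_ definition above) =====
theorem Keymaker_spec : Claim_equal_Keymaker := by
  intro k _
  unfold Spec_Keymaker Keymaker Keymaker_alt
  by_cases hk : k ≤ 0
  · rw [PySem.List.pyRange_one_eq_nil (by omega)]
    simp [hk, PySem.List.len_eq, PySem.List.pyRange_one_eq_nil]
  · replace hk : 0 < k := by omega
    rw [if_neg (by omega)]
    rw [PySem.List.pyRange_one_cons (by omega)]
    simp only [List.foldl_cons]
    have h0 : kmOuterA k (some ([], 0)) 0 = some (List.replicate k.toNat 1, 1) := by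
      simp only [kmOuterA]
      rw [PySem.List.foldl_append_singleton_eq_map (fun _ => (1 : Int))]
      rw [List.map_const']
      simp [PySem.List.length_pyRange_one]
    rw [h0]
    simp only [zero_add]
    rw [km_outer k 1 le_rfl _ (by simp; omega) (by intro v hv; right; exact List.eq_of_mem_replicate hv)]
    rw [PySem.List.pyRepeat_singleton]
    exact (km_print _).trans (km_join _).symm
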